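-- pv_equiv track=rewrite | github.com/pabloschwarzenberg/grader | hito2_ej1/hito2_ej1_bbeac069d5a6da8d2f03ac31eb1b4d49.py | alinear
-- ===== SOURCE A (Python) =====
-- def alinear(adn1, adn2):
--     adn1 = list(adn1.upper())
--     adn2 = list(adn2.upper())
--
--     i = 0
--     while i < len(adn1):
--         if adn1[i] == adn2[i]:
--             i += 1
--         else:
--             adn2.insert(i,"_")
--             i += 1
--     return "".join(adn2)
-- ===== SOURCE B (Python) =====
-- def alinear(adn1, adn2):
--     a = adn1.upper()
--     b = adn2.upper()
--     out = []
--     j = 0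
--     for c in a:
--         if j < len(b) and b[j] == c:
--             out.append(b[j])
--             j += 1
--         else:
--             out.append("_")
--     return "".join(out) + b[j:]
-- ===== Notes on version B (the rewrite author's own statement) =====
-- stated objective: faster
-- what changed: replaces A's while loop that indexes into adn2 and calls list.insert (shifting the whole tail) on every mismatch with a single simultaneous pass over adn1 and a pointer into the original adn2, appending '_' on mismatch and the leftover adn2 suffix at the end
import Mathlib
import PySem

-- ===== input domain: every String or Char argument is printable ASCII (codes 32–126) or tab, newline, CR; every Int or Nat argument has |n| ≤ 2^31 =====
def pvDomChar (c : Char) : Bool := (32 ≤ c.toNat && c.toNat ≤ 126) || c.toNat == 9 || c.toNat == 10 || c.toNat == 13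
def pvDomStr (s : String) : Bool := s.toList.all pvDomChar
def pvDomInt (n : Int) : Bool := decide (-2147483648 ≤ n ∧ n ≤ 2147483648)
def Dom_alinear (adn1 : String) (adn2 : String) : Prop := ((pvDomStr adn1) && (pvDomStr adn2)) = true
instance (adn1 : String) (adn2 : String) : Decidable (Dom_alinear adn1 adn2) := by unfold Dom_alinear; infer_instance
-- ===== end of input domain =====

-- B replaces A's index-and-insert while loop (each insert shifts the tail, O(n^2))
-- by a single simultaneous pass over the two strings with a pointer into the original adn2 (O(n)).

-- ===== PORT A =====
-- the while loop of A: index i into adn1, adn2 mutated by insert; none = IndexError on adn2[i]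
def loopA (u : List Char) (v : List Char) (i : Nat) : Option (List Char) :=
  if h : i < u.length then
    match PySem.List.pyGet? v (i : Int) with
    | none => none                                    -- adn2[i] raises IndexError
    | some c =>
      if u[i] = c then loopA u v (i + 1)
      else loopA u (PySem.List.insert v (i : Int) '_') (i + 1)
  else some v
termination_by u.length - i

def alinear (adn1 : String) (adn2 : String) : String :=
  match loopA (PySem.Chars.upper adn1.toList) (PySem.Chars.upper adn2.toList) 0 with
  | some w => String.ofList w                             -- "".join(adn2)
  | none => ""                                        -- IndexError; excluded by Pre_alinear

-- ===== PORT B =====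
-- B's single pass: walk adn1 and a pointer into the original adn2 together;
-- the remaining suffix of adn2 (python's b[j:]) is appended when adn1 is exhausted.
def loopB (u : List Char) (v : List Char) : List Char :=
  match u, v with
  | [], v => v                                        -- "".join(out) + b[j:]
  | _ :: u', [] => '_' :: loopB u' []                 -- j ≥ len(b): append "_"
  | c :: u', d :: v' =>
    if d = c then d :: loopB u' v'                    -- match: consume b[j]
    else '_' :: loopB u' (d :: v')                    -- mismatch: append "_", keep j

def alinear_alt (adn1 : String) (adn2 : String) : String :=
  String.ofList (loopB (PySem.Chars.upper adn1.toList) (PySem.Chars.upper adn2.toList))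

-- ===== PRECONDITION & SPEC =====
-- Pre_ excludes exactly the inputs on which A raises IndexError: those where the
-- uppercased adn2 is a subsequence of the uppercased adn1 minus its last character
-- (the greedy match then exhausts adn2 before the while loop ends and adn2[i] is out of range).
def Pre_alinear (adn1 : String) (adn2 : String) : Prop :=
  adn1 = "" ∨
  ¬ List.Sublist (PySem.Chars.upper adn2.toList)
      ((PySem.Chars.upper adn1.toList).take ((PySem.Chars.upper adn1.toList).length - 1))
instance (adn1 : String) (adn2 : String) : Decidable (Pre_alinear adn1 adn2) := by
  unfold Pre_alinear; infer_instance

def pvWitness_alinear : String × String := ("AC", "AG")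

def Spec_alinear (adn1 : String) (adn2 : String) (out : String) : Prop := out = alinear_alt adn1 adn2
instance (adn1 : String) (adn2 : String) (out : String) : Decidable (Spec_alinear adn1 adn2 out) := by unfold Spec_alinear; infer_instance

-- ===== CLAIM (what is proved, stated in full; the proofs are below) =====
def Claim_equal_alinear : Prop := ∀ (adn1 : String) (adn2 : String), Dom_alinear adn1 adn2 → Pre_alinear adn1 adn2 → Spec_alinear adn1 adn2 (alinear adn1 adn2)

-- ===== LEMMAS AND PROOFS =====

-- A's loop, reformulated on the unprocessed suffixes (proof device; none = IndexError)
def runA : List Char → List Char → Option (List Char)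
  | [], v => some v
  | _ :: _, [] => none
  | c :: u', d :: v' =>
    if c = d then (runA u' v').map (d :: ·)
    else (runA u' (d :: v')).map ('_' :: ·)

-- loopA on state (w ++ vrem, i) with i = |w| computes runA on the suffixes, prefixed by w
lemma loopA_eq_runA (u : List Char) :
    ∀ (n i : Nat) (w vrem : List Char), u.length - i ≤ n → i = w.length →
      loopA u (w ++ vrem) i = (runA (u.drop i) vrem).map (w ++ ·) := by
  intro n
  induction n with
  | zero =>
    intro i w vrem hn hi
    have hge : ¬ i < u.length := by omega
    rw [loopA, dif_neg hge, List.drop_of_length_le (by omega)]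
    simp [runA]
  | succ n ih =>
    intro i w vrem hn hi
    by_cases h : i < u.length
    · rw [List.drop_eq_getElem_cons h]
      cases vrem with
      | nil =>
        have hnone : w[i]? = none := List.getElem?_eq_none (by omega)
        rw [loopA, dif_pos h]
        simp [hnone, runA]
      | cons d v' =>
        have hget : PySem.List.pyGet? (w ++ d :: v') (i : Int) = some d := by
          subst hi; exact_mod_cast PySem.List.pyGet?_append_length w v' d
        rw [loopA, dif_pos h]
        simp only [hget]
        by_cases hc : u[i] = d
        · rw [if_pos hc]
          have : w ++ d :: v' = (w ++ [d]) ++ v' := by simp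
          rw [this, ih (i + 1) (w ++ [d]) v' (by omega) (by simp [hi])]
          rw [runA, if_pos hc]
          cases runA (u.drop (i + 1)) v' <;> simp
        · rw [if_neg hc]
          have hins : PySem.List.insert (w ++ d :: v') (i : Int) '_' = (w ++ ['_']) ++ d :: v' := by
            rw [PySem.List.insert_natCast _ _ _ (by simp; omega)]
            subst hi
            simp
          rw [hins, ih (i + 1) (w ++ ['_']) (d :: v') (by omega) (by simp [hi])]
          rw [runA, if_neg hc]
          cases runA (u.drop (i + 1)) (d :: v') <;> simp
    · rw [loopA, dif_neg h, List.drop_of_length_le (by omega)]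
      simp [runA]

-- wherever A's loop returns, B's single pass returns the same list
lemma loopB_eq_of_runA : ∀ (u v w : List Char), runA u v = some w → loopB u v = w := by
  intro u
  induction u with
  | nil => intro v w h; simp [runA] at h; simp [loopB, h]
  | cons c u' ih =>
    intro v w h
    cases v with
    | nil => simp [runA] at h
    | cons d v' =>
      rw [runA] at h
      by_cases hc : c = d
      · rw [if_pos hc] at h
        cases hr : runA u' v' with
        | none => rw [hr] at h; simp at h
        | some w' =>
          rw [hr] at h; simp at h
          rw [loopB, if_pos hc.symm, ih v' w' hr, h]
      · rw [if_neg hc] at h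
        cases hr : runA u' (d :: v') with
        | none => rw [hr] at h; simp at h
        | some w' =>
          rw [hr] at h; simp at h
          rw [loopB, if_neg (fun hdc => hc hdc.symm), ih (d :: v') w' hr, h]

-- A raises (runA = none) exactly on the inputs Raises_ describes
lemma sublist_of_runA_none : ∀ (u v : List Char), runA u v = none →
    u ≠ [] ∧ List.Sublist v (u.take (u.length - 1)) := by
  intro u
  induction u with
  | nil => intro v h; simp [runA] at h
  | cons c u' ih =>
    intro v h
    refine ⟨by simp, ?_⟩
    cases v with
    | nil => exact List.nil_sublist _
    | cons d v' =>
      rw [runA] at h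
      by_cases hc : c = d
      · rw [if_pos hc] at h
        cases hr : runA u' v' with
        | some w' => rw [hr] at h; simp at h
        | none =>
          obtain ⟨hne, hsub⟩ := ih v' hr
          have hlen : 0 < u'.length := List.length_pos_of_ne_nil hne
          simp only [List.length_cons, Nat.add_sub_cancel]
          rw [show u'.length = (u'.length - 1) + 1 by omega, List.take_succ_cons]
          exact hc ▸ List.Sublist.cons₂ c hsub
      · rw [if_neg hc] at h
        cases hr : runA u' (d :: v') with
        | some w' => rw [hr] at h; simp at h
        | none =>
          obtain ⟨hne, hsub⟩ := ih (d :: v') hr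
          have hlen : 0 < u'.length := List.length_pos_of_ne_nil hne
          simp only [List.length_cons, Nat.add_sub_cancel]
          rw [show u'.length = (u'.length - 1) + 1 by omega, List.take_succ_cons]
          exact List.Sublist.cons c hsub

-- ===== VERDICT (by name: the statement is the Claim_ definition above) =====
theorem alinear_spec : Claim_equal_alinear := by
  intro adn1 adn2 _ hpre
  unfold Spec_alinear alinear alinear_alt
  have h0 := loopA_eq_runA (PySem.Chars.upper adn1.toList)
    (PySem.Chars.upper adn1.toList).length 0 [] (PySem.Chars.upper adn2.toList)
    (by omega) (by simp)
  simp only [List.nil_append, List.drop_zero] at h0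
  rw [h0]
  cases hr : runA (PySem.Chars.upper adn1.toList) (PySem.Chars.upper adn2.toList) with
  | none =>
    exfalso
    obtain ⟨hne, hsub⟩ := sublist_of_runA_none _ _ hr
    rcases hpre with h | h
    · subst h; simp [PySem.Chars.upper] at hne
    · exact h hsub
  | some w =>
    simp [loopB_eq_of_runA _ _ _ hr]
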